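-- pv_equiv track=rewrite | github.com/pombreda/pyhound | pyhound/hound.py | get_lines_with_context
-- ===== SOURCE A (Python) =====
-- import math
--
-- LINE_KIND_MATCH = 1
--
-- LINE_KIND_CONTEXT = 2
--
-- def get_lines_with_context(
--         line, line_number,
--         lines_before=(), lines_after=(),
--         requested_before=None, requested_after=None, requested_context=None):
--     """Return the given line with its line kind and its line number with
--     the requested context (if any).
--
--     This function returns an iterator. Each item is a tuple with the 3
--     items: the line number, the line kind (see LINE_KIND_*) and the
--     line itself.
--
--     This implements the "-A", "-B" and "-C" options of ``grep``.
--     """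
--     requested_before = requested_before or 0
--     requested_after = requested_after or 0
--     assert requested_before >= 0
--     assert requested_after >= 0
--     if requested_context is not None:
--         assert requested_context >= 1
--     if requested_before or requested_after:
--         assert requested_context is None
--
--     if requested_context is not None:
--         requested_context -= 1  # Don't count the matching line.
--         requested_before = int(math.ceil(requested_context / 2))
--         requested_after = requested_context - requested_before
--         requested_after = min(requested_after, len(lines_after))
--         requested_before = requested_context - requested_after
--
--     before = ()
--     after = ()
--     if requested_before and requested_before > 0:
--         before = lines_before[-requested_before:]
--         n_before = len(before)
--     if requested_after and requested_after > 0: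
--         after = lines_after[:requested_after]
--     for i, contextual_line in enumerate(before):
--         yield line_number - n_before + i, LINE_KIND_CONTEXT, contextual_line
--     yield line_number, LINE_KIND_MATCH, line
--     for i, contextual_line in enumerate(after, 1):
--         yield line_number + i, LINE_KIND_CONTEXT, contextual_line
-- ===== SOURCE B (Python) =====
-- LINE_KIND_MATCH = 1
-- LINE_KIND_CONTEXT = 2
--
--
-- def get_lines_with_context(
--         line, line_number,
--         lines_before=(), lines_after=(),
--         requested_before=None, requested_after=None, requested_context=None):
--     """Same contract as A, but emitted by direct index arithmetic over one
--     offset range: no slicing, no window list, no enumerate.  Each offset k in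
--     range(-nb, na+1) maps straight to a line number and, for k != 0, to an
--     element of the original sequences fetched by index."""
--     requested_before = requested_before or 0
--     requested_after = requested_after or 0
--     assert requested_before >= 0
--     assert requested_after >= 0
--     if requested_context is not None:
--         assert requested_context >= 1
--     if requested_before or requested_after:
--         assert requested_context is None
--
--     if requested_context is not None:
--         ctx = requested_context - 1  # the matching line is not counted
--         requested_after = min(ctx - (ctx + 1) // 2, len(lines_after))
--         requested_before = ctx - requested_after
--
--     nb = min(requested_before, len(lines_before)) if requested_before > 0 else 0
--     na = min(requested_after, len(lines_after)) if requested_after > 0 else 0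
--     for k in range(-nb, na + 1):
--         if k < 0:
--             yield line_number + k, LINE_KIND_CONTEXT, lines_before[len(lines_before) + k]
--         elif k == 0:
--             yield line_number, LINE_KIND_MATCH, line
--         else:
--             yield line_number + k, LINE_KIND_CONTEXT, lines_after[k - 1]
-- ===== Notes on version B (the rewrite author's own statement) =====
-- stated objective: alternative
-- what changed: A materialises before/after via negative slicing and emits three separate yield blocks with enumerate offsets; B never slices or builds window lists: it clamps the counts to nb/na and runs one loop over the offset range(-nb, na+1), computing each line number and fetching each context line from the original sequences by direct index arithmetic (and replaces float math.ceil by integer (ctx+1)//2).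
import Mathlib
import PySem

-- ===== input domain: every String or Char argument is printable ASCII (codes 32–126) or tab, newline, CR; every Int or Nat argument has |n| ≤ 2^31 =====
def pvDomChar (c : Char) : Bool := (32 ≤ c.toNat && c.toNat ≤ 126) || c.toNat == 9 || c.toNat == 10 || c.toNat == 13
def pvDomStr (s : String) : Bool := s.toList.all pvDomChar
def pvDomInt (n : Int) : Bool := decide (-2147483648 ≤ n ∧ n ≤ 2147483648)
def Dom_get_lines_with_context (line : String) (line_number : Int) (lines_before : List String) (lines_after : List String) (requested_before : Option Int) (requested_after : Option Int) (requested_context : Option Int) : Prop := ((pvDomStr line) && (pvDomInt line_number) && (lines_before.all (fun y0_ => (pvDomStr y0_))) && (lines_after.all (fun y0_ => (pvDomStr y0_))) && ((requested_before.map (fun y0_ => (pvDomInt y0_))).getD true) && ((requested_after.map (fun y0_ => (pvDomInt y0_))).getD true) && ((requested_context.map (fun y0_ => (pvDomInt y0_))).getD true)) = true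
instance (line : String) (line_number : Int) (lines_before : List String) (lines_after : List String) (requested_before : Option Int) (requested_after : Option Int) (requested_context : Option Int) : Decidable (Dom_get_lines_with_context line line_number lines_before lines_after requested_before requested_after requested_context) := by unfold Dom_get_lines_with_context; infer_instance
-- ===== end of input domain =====

-- B replaces A's slicing + three yield blocks by direct index arithmetic over one offset
-- range(-nb, na+1), fetching context lines from the original sequences (objective: alternative).
-- Both programs are generators in Python; equivalence is about the yielded sequence (no mutation).

-- ===== PORT A =====
-- math.ceil(x / 2) on an int x with |x| ≤ 2^31: x/2 is exact in binary floating point,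
-- so the result is exactly the integer ceiling -((-x) // 2); ported as such.
def get_lines_with_context (line : String) (line_number : Int) (lines_before : List String) (lines_after : List String) (requested_before : Option Int) (requested_after : Option Int) (requested_context : Option Int) : List (Int × Int × String) :=
  let rb0 := requested_before.getD 0   -- requested_before or 0
  let ra0 := requested_after.getD 0    -- requested_after or 0
  let p : Int × Int :=
    match requested_context with
    | some rc0 =>
        let rc := rc0 - 1                                 -- don't count the matching line
        let rb := -(PySem.Int.floordiv (-rc) 2)           -- int(math.ceil(rc / 2)), exact here
        let ra := rc - rb
        let ra := min ra (lines_after.length : Int)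
        (rc - ra, ra)
    | none => (rb0, ra0)
  let requested_before := p.1
  let requested_after := p.2
  let before : List String :=
    if requested_before ≠ 0 ∧ requested_before > 0 then
      PySem.List.slice lines_before (some (-requested_before)) none
    else []
  let after : List String :=
    if requested_after ≠ 0 ∧ requested_after > 0 then
      PySem.List.slice lines_after none (some requested_after)
    else []
  let n_before := (before.length : Int)
  (PySem.List.enumerate before 0).map (fun q => (line_number - n_before + q.1, (2 : Int), q.2))
    ++ [(line_number, 1, line)]
    ++ (PySem.List.enumerate after 1).map (fun q => (line_number + q.1, (2 : Int), q.2))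

-- ===== PORT B =====
-- list indices lines_before[len+k] (k < 0) and lines_after[k-1] (k > 0) are always in range
-- for k ∈ range(-nb, na+1), so pyGetD with an unused default is exact here.
def get_lines_with_context_alt (line : String) (line_number : Int) (lines_before : List String) (lines_after : List String) (requested_before : Option Int) (requested_after : Option Int) (requested_context : Option Int) : List (Int × Int × String) :=
  let rb0 := requested_before.getD 0
  let ra0 := requested_after.getD 0
  let p : Int × Int :=
    match requested_context with
    | some rc0 =>
        let ctx := rc0 - 1
        let ra := min (ctx - PySem.Int.floordiv (ctx + 1) 2) (lines_after.length : Int)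
        (ctx - ra, ra)
    | none => (rb0, ra0)
  let nb : Int := if p.1 > 0 then min p.1 (lines_before.length : Int) else 0
  let na : Int := if p.2 > 0 then min p.2 (lines_after.length : Int) else 0
  (PySem.List.pyRange (-nb) (na + 1) 1).map (fun k =>
    if k < 0 then (line_number + k, (2 : Int), PySem.List.pyGetD lines_before ((lines_before.length : Int) + k) "")
    else if k = 0 then (line_number, (1 : Int), line)
    else (line_number + k, (2 : Int), PySem.List.pyGetD lines_after (k - 1) ""))

-- ===== PRECONDITION & SPEC =====
-- Pre_ excludes exactly the inputs on which A's asserts raise AssertionError: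
-- a negative requested_before/after, requested_context < 1, or before/after combined with context.
def Pre_get_lines_with_context (line : String) (line_number : Int) (lines_before : List String) (lines_after : List String) (requested_before : Option Int) (requested_after : Option Int) (requested_context : Option Int) : Prop :=
  0 ≤ requested_before.getD 0 ∧ 0 ≤ requested_after.getD 0 ∧
  (∀ c : Int, requested_context = some c → 1 ≤ c) ∧
  ((requested_before.getD 0 ≠ 0 ∨ requested_after.getD 0 ≠ 0) → requested_context = none)
instance (line : String) (line_number : Int) (lines_before : List String) (lines_after : List String) (requested_before : Option Int) (requested_after : Option Int) (requested_context : Option Int) : Decidable (Pre_get_lines_with_context line line_number lines_before lines_after requested_before requested_after requested_context) := by unfold Pre_get_lines_with_context; infer_instance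

def pvWitness_get_lines_with_context : String × Int × List String × List String × Option Int × Option Int × Option Int :=
  ("match", 10, ["b1", "b2"], ["a1"], some 1, some 2, none)

def Spec_get_lines_with_context (line : String) (line_number : Int) (lines_before : List String) (lines_after : List String) (requested_before : Option Int) (requested_after : Option Int) (requested_context : Option Int) (out : List (Int × Int × String)) : Prop := out = get_lines_with_context_alt line line_number lines_before lines_after requested_before requested_after requested_context
instance (line : String) (line_number : Int) (lines_before : List String) (lines_after : List String) (requested_before : Option Int) (requested_after : Option Int) (requested_context : Option Int) (out : List (Int × Int × String)) : Decidable (Spec_get_lines_with_context line line_number lines_before lines_after requested_before requested_after requested_context out) := by unfold Spec_get_lines_with_context; infer_instance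

-- ===== CLAIM (what is proved, stated in full; the proofs are below) =====
def Claim_equal_get_lines_with_context : Prop := ∀ (line : String) (line_number : Int) (lines_before : List String) (lines_after : List String) (requested_before : Option Int) (requested_after : Option Int) (requested_context : Option Int), Dom_get_lines_with_context line line_number lines_before lines_after requested_before requested_after requested_context → Pre_get_lines_with_context line line_number lines_before lines_after requested_before requested_after requested_context → Spec_get_lines_with_context line line_number lines_before lines_after requested_before requested_after requested_context (get_lines_with_context line line_number lines_before lines_after requested_before requested_after requested_context)

-- ===== LEMMAS AND PROOFS =====

-- the integer ceiling -((-c) // 2) equals (c + 1) // 2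
theorem ceil_half_eq (c : Int) :
    -(PySem.Int.floordiv (-c) 2) = PySem.Int.floordiv (c + 1) 2 := by
  rw [PySem.Int.floordiv_eq_ediv_of_pos (by norm_num), PySem.Int.floordiv_eq_ediv_of_pos (by norm_num)]
  omega

-- before-chunk: the negative half of the offset range, emitted by index arithmetic,
-- is A's enumerate over the last nb elements of lb
theorem chunk_before (lb : List String) (ln : Int) (nb : Nat) (h : nb ≤ lb.length) :
    (PySem.List.pyRange (-(nb : Int)) 0 1).map (fun k =>
        (ln + k, (2 : Int), PySem.List.pyGetD lb ((lb.length : Int) + k) ""))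
      = (PySem.List.enumerate (lb.drop (lb.length - nb)) 0).map
          (fun q => (ln - (nb : Int) + q.1, (2 : Int), q.2)) := by
  apply List.ext_getElem
  · simp [PySem.List.length_pyRange_one, PySem.List.length_enumerate]
    omega
  · intro i h1 h2
    rw [List.length_map, PySem.List.length_pyRange_one] at h1
    have hi : i < nb := by omega
    rw [List.getElem_map, List.getElem_map, PySem.List.getElem_pyRange_one,
        PySem.List.getElem_enumerate]
    rw [PySem.List.pyGetD_eq_getElem lb "" (by omega) (by omega)]
    simp only [List.getElem_drop]
    have e2 : ((lb.length : Int) + (-(nb : Int) + (i : Int))).toNat = lb.length - nb + i := by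
      omega
    simp only [e2, Prod.mk.injEq]
    exact ⟨by omega, trivial⟩

-- after-chunk: the positive half of the offset range is A's enumerate from 1 over la.take na
theorem chunk_after (la : List String) (ln : Int) (na : Nat) (h : na ≤ la.length) :
    (PySem.List.pyRange 1 ((na : Int) + 1) 1).map (fun k =>
        (ln + k, (2 : Int), PySem.List.pyGetD la (k - 1) ""))
      = (PySem.List.enumerate (la.take na) 1).map (fun q => (ln + q.1, (2 : Int), q.2)) := by
  apply List.ext_getElem
  · simp [PySem.List.length_pyRange_one, PySem.List.length_enumerate]
    omega
  · intro i h1 h2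
    rw [List.length_map, PySem.List.length_pyRange_one] at h1
    have hi : i < na := by omega
    rw [List.getElem_map, List.getElem_map, PySem.List.getElem_pyRange_one,
        PySem.List.getElem_enumerate]
    rw [PySem.List.pyGetD_eq_getElem la "" (by omega) (by omega)]
    simp only [List.getElem_take]
    have e2 : ((1 : Int) + (i : Int) - 1).toNat = i := by omega
    simp only [e2]

-- the whole emission: one offset-range pass = A's three blocks, for clamped counts nb, na
theorem main_eq (line : String) (ln : Int) (lb la : List String) (nb na : Nat)
    (hnb : nb ≤ lb.length) (hna : na ≤ la.length) :
    (PySem.List.pyRange (-(nb : Int)) ((na : Int) + 1) 1).map (fun k =>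
        if k < 0 then (ln + k, (2 : Int), PySem.List.pyGetD lb ((lb.length : Int) + k) "")
        else if k = 0 then (ln, (1 : Int), line)
        else (ln + k, (2 : Int), PySem.List.pyGetD la (k - 1) ""))
      =
    (PySem.List.enumerate (lb.drop (lb.length - nb)) 0).map
        (fun q => (ln - ((lb.drop (lb.length - nb)).length : Int) + q.1, (2 : Int), q.2))
      ++ [(ln, 1, line)]
      ++ (PySem.List.enumerate (la.take na) 1).map (fun q => (ln + q.1, (2 : Int), q.2)) := by
  have hmid : PySem.List.pyRange (0 : Int) 1 1 = [0] := by decide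
  rw [PySem.List.pyRange_one_append (-(nb : Int)) 0 ((na : Int) + 1) (by omega) (by omega),
      PySem.List.pyRange_one_append 0 1 ((na : Int) + 1) (by omega) (by omega),
      hmid, List.map_append, List.map_append, List.map_singleton]
  have hlen : ((lb.drop (lb.length - nb)).length : Int) = (nb : Int) := by
    simp [List.length_drop]; omega
  rw [hlen, List.append_assoc]
  refine congrArg₂ (· ++ ·) ?_ (congrArg₂ (· ++ ·) ?_ ?_)
  · rw [← chunk_before lb ln nb hnb]
    exact List.map_congr_left (fun k hk => by
      have hmem : -(nb : Int) ≤ k ∧ k < 0 := PySem.List.mem_pyRange_one.1 hk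
      rw [if_pos hmem.2])
  · norm_num
  · rw [← chunk_after la ln na hna]
    exact List.map_congr_left (fun k hk => by
      have hmem : (1 : Int) ≤ k ∧ k < (na : Int) + 1 := PySem.List.mem_pyRange_one.1 hk
      rw [if_neg (by omega), if_neg (by omega)])

-- A's epilogue (slices + three blocks) equals B's epilogue (offset-range pass) for ANY Int pair (rb, ra)
theorem core_eq (line : String) (ln : Int) (lb la : List String) (rb ra : Int) :
    (let before : List String :=
        if rb ≠ 0 ∧ rb > 0 then PySem.List.slice lb (some (-rb)) none else []
     let after : List String :=
        if ra ≠ 0 ∧ ra > 0 then PySem.List.slice la none (some ra) else []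
     let n_before := (before.length : Int)
     (PySem.List.enumerate before 0).map (fun q => (ln - n_before + q.1, (2 : Int), q.2))
       ++ [(ln, 1, line)]
       ++ (PySem.List.enumerate after 1).map (fun q => (ln + q.1, (2 : Int), q.2)))
    = (let nb : Int := if rb > 0 then min rb (lb.length : Int) else 0
       let na : Int := if ra > 0 then min ra (la.length : Int) else 0
       (PySem.List.pyRange (-nb) (na + 1) 1).map (fun k =>
         if k < 0 then (ln + k, (2 : Int), PySem.List.pyGetD lb ((lb.length : Int) + k) "")
         else if k = 0 then (ln, (1 : Int), line)
         else (ln + k, (2 : Int), PySem.List.pyGetD la (k - 1) ""))) := by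
  have hb : (rb ≠ 0 ∧ rb > 0) ↔ rb > 0 := by omega
  have ha : (ra ≠ 0 ∧ ra > 0) ↔ ra > 0 := by omega
  simp only [hb, ha]
  set nbN : Nat := if rb > 0 then min rb.toNat lb.length else 0 with hnbN
  set naN : Nat := if ra > 0 then min ra.toNat la.length else 0 with hnaN
  have hnbI : (if rb > 0 then min rb (lb.length : Int) else 0) = (nbN : Int) := by
    rw [hnbN]; split_ifs with h
    · push_cast; omega
    · omega
  have hnaI : (if ra > 0 then min ra (la.length : Int) else 0) = (naN : Int) := by
    rw [hnaN]; split_ifs with h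
    · push_cast; omega
    · omega
  have hbefore : (if rb > 0 then PySem.List.slice lb (some (-rb)) none else [])
      = lb.drop (lb.length - nbN) := by
    rw [hnbN]; split_ifs with h
    · have hrb : rb = ((rb.toNat : Nat) : Int) := by omega
      rw [hrb, PySem.List.slice_from_neg_natCast lb rb.toNat (by omega)]
      congr 1
      omega
    · simp [List.drop_length]
  have hafter : (if ra > 0 then PySem.List.slice la none (some ra) else [])
      = la.take naN := by
    rw [hnaN]; split_ifs with h
    · rw [PySem.List.slice_to la (by omega)]
      rcases le_total ra.toNat la.length with hle | hle
      · rw [min_eq_left hle]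
      · rw [min_eq_right hle, List.take_of_length_le hle, List.take_of_length_le (le_refl _)]
    · simp
  simp only [hbefore, hafter, hnbI, hnaI]
  exact (main_eq line ln lb la nbN naN
    (by rw [hnbN]; split_ifs <;> omega) (by rw [hnaN]; split_ifs <;> omega)).symm

-- ===== VERDICT (by name: the statement is the Claim_ definition above) =====
theorem get_lines_with_context_spec : Claim_equal_get_lines_with_context := by
  intro line ln lb la rb ra rc _hDom _hPre
  unfold Spec_get_lines_with_context get_lines_with_context get_lines_with_context_alt
  cases rc with
  | none =>
      simpa using core_eq line ln lb la (rb.getD 0) (ra.getD 0)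
  | some c =>
      simp only [ceil_half_eq]
      have h : (c - 1) - -(PySem.Int.floordiv (-(c - 1)) 2)
          = (c - 1) - PySem.Int.floordiv ((c - 1) + 1) 2 := by rw [ceil_half_eq]
      simpa [ceil_half_eq] using core_eq line ln lb la
        ((c - 1) - min ((c - 1) - PySem.Int.floordiv ((c - 1) + 1) 2) (la.length : Int))
        (min ((c - 1) - PySem.Int.floordiv ((c - 1) + 1) 2) (la.length : Int))
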